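-- pv_equiv track=rewrite | github.com/Kkrykunov/GT14.3 | GT14_v14_3_FINAL.py | _get_feature_type
-- ===== SOURCE A (Python) =====
-- def _get_feature_type(feature_name):
--     """Визначення типу фічі за назвою"""
--     if any(x in feature_name for x in ['hour', 'day', 'month', 'weekend', 'time']):
--         return 'temporal'
--     elif 'lag' in feature_name:
--         return 'lag'
--     elif 'rolling' in feature_name:
--         return 'rolling_stat'
--     elif any(x in feature_name for x in ['rsi', 'macd', 'bb_', 'stoch', 'williams']):
--         return 'technical'
--     elif any(x in feature_name for x in ['whale', 'flow', 'intensity']):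
--         return 'whale_specific'
--     elif any(x in feature_name for x in ['vol', 'change']):
--         return 'volatility'
--     elif 'interaction' in feature_name:
--         return 'interaction'
--     elif any(x in feature_name for x in ['log', 'sqrt', 'zscore']):
--         return 'transform'
--     else:
--         return 'other'
-- ===== SOURCE B (Python) =====
-- # B: no cascade / no rule loop -- one flat keyword->priority map; take the MINIMUM
-- # priority among all matching keywords (aggregation instead of first-match dispatch).
-- _KEYWORD_PRIORITY = {
--     'hour': 0, 'day': 0, 'month': 0, 'weekend': 0, 'time': 0,
--     'lag': 1,
--     'rolling': 2,
--     'rsi': 3, 'macd': 3, 'bb_': 3, 'stoch': 3, 'williams': 3,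
--     'whale': 4, 'flow': 4, 'intensity': 4,
--     'vol': 5, 'change': 5,
--     'interaction': 6,
--     'log': 7, 'sqrt': 7, 'zscore': 7,
-- }
-- _LABELS = ['temporal', 'lag', 'rolling_stat', 'technical', 'whale_specific',
--            'volatility', 'interaction', 'transform']
--
-- def _get_feature_type(feature_name):
--     best = min((p for k, p in _KEYWORD_PRIORITY.items() if k in feature_name),
--                default=None)
--     return 'other' if best is None else _LABELS[best]
-- ===== Notes on version B (the rewrite author's own statement) =====
-- stated objective: alternative
-- what changed: Replaces the ordered if/elif cascade (first-match dispatch) by an aggregation: a flat keyword-to-priority map is scanned once, the minimum priority among ALL matching keywords is taken, and its label (or 'other' when no keyword matches) is returned.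
import Mathlib
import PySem

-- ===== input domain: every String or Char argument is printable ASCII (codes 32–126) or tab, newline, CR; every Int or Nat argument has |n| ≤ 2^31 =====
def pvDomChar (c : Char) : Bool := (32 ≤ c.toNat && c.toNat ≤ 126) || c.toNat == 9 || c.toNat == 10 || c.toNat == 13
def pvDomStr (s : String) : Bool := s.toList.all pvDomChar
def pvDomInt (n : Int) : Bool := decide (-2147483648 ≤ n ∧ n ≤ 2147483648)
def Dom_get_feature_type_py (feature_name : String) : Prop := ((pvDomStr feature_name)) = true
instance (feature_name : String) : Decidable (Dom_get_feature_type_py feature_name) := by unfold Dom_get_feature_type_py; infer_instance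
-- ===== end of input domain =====

-- B replaces A's first-match if/elif cascade by an aggregation over a flat keyword→priority map:
-- the minimum priority among all matching keywords selects the label (alternative; same cost).

-- ===== PORT A =====
def get_feature_type_py (feature_name : String) : String :=
  if ["hour", "day", "month", "weekend", "time"].any (fun x => PySem.Str.isIn x feature_name) then
    "temporal"
  else if PySem.Str.isIn "lag" feature_name then
    "lag"
  else if PySem.Str.isIn "rolling" feature_name then
    "rolling_stat"
  else if ["rsi", "macd", "bb_", "stoch", "williams"].any (fun x => PySem.Str.isIn x feature_name) then
    "technical"
  else if ["whale", "flow", "intensity"].any (fun x => PySem.Str.isIn x feature_name) then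
    "whale_specific"
  else if ["vol", "change"].any (fun x => PySem.Str.isIn x feature_name) then
    "volatility"
  else if PySem.Str.isIn "interaction" feature_name then
    "interaction"
  else if ["log", "sqrt", "zscore"].any (fun x => PySem.Str.isIn x feature_name) then
    "transform"
  else
    "other"

-- ===== PORT B =====
-- the flat keyword → priority map of Source B, in insertion order
def pvKeywordPriority : List (String × Nat) :=
  [ ("hour", 0), ("day", 0), ("month", 0), ("weekend", 0), ("time", 0),
    ("lag", 1),
    ("rolling", 2),
    ("rsi", 3), ("macd", 3), ("bb_", 3), ("stoch", 3), ("williams", 3),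
    ("whale", 4), ("flow", 4), ("intensity", 4),
    ("vol", 5), ("change", 5),
    ("interaction", 6),
    ("log", 7), ("sqrt", 7), ("zscore", 7) ]

def pvLabels : List String :=
  ["temporal", "lag", "rolling_stat", "technical", "whale_specific",
   "volatility", "interaction", "transform"]

-- Python's min((p for k, p in … if k in feature_name), default=None): a left fold over the
-- map keeping the running minimum of the priorities of the matching keywords (none = no match yet)
def pvMinHit : List (String × Nat) → String → Option Nat → Option Nat
  | [], _, acc => acc
  | (k, p) :: rest, s, acc =>
      pvMinHit rest s
        (if PySem.Str.isIn k s then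
          some (match acc with | none => p | some q => Nat.min q p)
        else acc)

def get_feature_type_py_alt (feature_name : String) : String :=
  match pvMinHit pvKeywordPriority feature_name none with
  | none => "other"
  | some p => pvLabels.getD p "other"

-- ===== PRECONDITION & SPEC =====
def Spec_get_feature_type_py (feature_name : String) (out : String) : Prop := out = get_feature_type_py_alt feature_name
instance (feature_name : String) (out : String) : Decidable (Spec_get_feature_type_py feature_name out) := by unfold Spec_get_feature_type_py; infer_instance

-- ===== CLAIM =====
def Claim_equal_get_feature_type_py : Prop := ∀ (feature_name : String), Dom_get_feature_type_py feature_name → Spec_get_feature_type_py feature_name (get_feature_type_py feature_name)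

-- ===== LEMMAS AND PROOFS =====
-- once the accumulator holds a priority no later entry can beat, the fold returns it unchanged
theorem pvMinHit_const (l : List (String × Nat)) (s : String) (q : Nat)
    (h : ∀ e ∈ l, q ≤ e.2) : pvMinHit l s (some q) = some q := by
  induction l with
  | nil => rfl
  | cons e rest ih =>
    obtain ⟨k, p⟩ := e
    rw [pvMinHit]
    have hq : Nat.min q p = q := Nat.min_eq_left (h (k, p) (List.mem_cons_self))
    by_cases hk : PySem.Str.isIn k s = true
    · simp only [hk, if_true, hq]
      exact ih (fun e he => h e (List.mem_cons_of_mem _ he))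
    · rw [Bool.not_eq_true] at hk
      rw [if_neg (ne_true_of_eq_false hk)]
      exact ih (fun e he => h e (List.mem_cons_of_mem _ he))

-- ===== VERDICT =====
theorem get_feature_type_py_spec : Claim_equal_get_feature_type_py := by
  intro s _
  unfold Spec_get_feature_type_py get_feature_type_py get_feature_type_py_alt pvKeywordPriority
  by_cases h0 : PySem.Str.isIn "hour" s = true
  · simp only [h0, List.any_cons, List.any_nil, Bool.false_or, Bool.or_false, Bool.or_true, Bool.true_or, if_true, if_false, ite_true, ite_false]
    rw [pvMinHit, if_pos h0]
    rw [pvMinHit_const _ s 0 (by decide)]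
    rfl
  rw [Bool.not_eq_true] at h0
  by_cases h1 : PySem.Str.isIn "day" s = true
  · simp only [h0, h1, List.any_cons, List.any_nil, Bool.false_or, Bool.or_false, Bool.or_true, Bool.true_or, if_true, if_false, ite_true, ite_false]
    rw [pvMinHit, if_neg (ne_true_of_eq_false h0)]
    rw [pvMinHit, if_pos h1]
    rw [pvMinHit_const _ s 0 (by decide)]
    rfl
  rw [Bool.not_eq_true] at h1
  by_cases h2 : PySem.Str.isIn "month" s = true
  · simp only [h0, h1, h2, List.any_cons, List.any_nil, Bool.false_or, Bool.or_false, Bool.or_true, Bool.true_or, if_true, if_false, ite_true, ite_false]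
    rw [pvMinHit, if_neg (ne_true_of_eq_false h0)]
    rw [pvMinHit, if_neg (ne_true_of_eq_false h1)]
    rw [pvMinHit, if_pos h2]
    rw [pvMinHit_const _ s 0 (by decide)]
    rfl
  rw [Bool.not_eq_true] at h2
  by_cases h3 : PySem.Str.isIn "weekend" s = true
  · simp only [h0, h1, h2, h3, List.any_cons, List.any_nil, Bool.false_or, Bool.or_false, Bool.or_true, Bool.true_or, if_true, if_false, ite_true, ite_false]
    rw [pvMinHit, if_neg (ne_true_of_eq_false h0)]
    rw [pvMinHit, if_neg (ne_true_of_eq_false h1)]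
    rw [pvMinHit, if_neg (ne_true_of_eq_false h2)]
    rw [pvMinHit, if_pos h3]
    rw [pvMinHit_const _ s 0 (by decide)]
    rfl
  rw [Bool.not_eq_true] at h3
  by_cases h4 : PySem.Str.isIn "time" s = true
  · simp only [h0, h1, h2, h3, h4, List.any_cons, List.any_nil, Bool.false_or, Bool.or_false, Bool.or_true, Bool.true_or, if_true, if_false, ite_true, ite_false]
    rw [pvMinHit, if_neg (ne_true_of_eq_false h0)]
    rw [pvMinHit, if_neg (ne_true_of_eq_false h1)]
    rw [pvMinHit, if_neg (ne_true_of_eq_false h2)]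
    rw [pvMinHit, if_neg (ne_true_of_eq_false h3)]
    rw [pvMinHit, if_pos h4]
    rw [pvMinHit_const _ s 0 (by decide)]
    rfl
  rw [Bool.not_eq_true] at h4
  by_cases h5 : PySem.Str.isIn "lag" s = true
  · simp only [h0, h1, h2, h3, h4, h5, List.any_cons, List.any_nil, Bool.false_or, Bool.or_false, Bool.or_true, Bool.true_or, if_true, if_false, ite_true, ite_false]
    rw [pvMinHit, if_neg (ne_true_of_eq_false h0)]
    rw [pvMinHit, if_neg (ne_true_of_eq_false h1)]
    rw [pvMinHit, if_neg (ne_true_of_eq_false h2)]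
    rw [pvMinHit, if_neg (ne_true_of_eq_false h3)]
    rw [pvMinHit, if_neg (ne_true_of_eq_false h4)]
    rw [pvMinHit, if_pos h5]
    rw [pvMinHit_const _ s 1 (by decide)]
    rfl
  rw [Bool.not_eq_true] at h5
  by_cases h6 : PySem.Str.isIn "rolling" s = true
  · simp only [h0, h1, h2, h3, h4, h5, h6, List.any_cons, List.any_nil, Bool.false_or, Bool.or_false, Bool.or_true, Bool.true_or, if_true, if_false, ite_true, ite_false]
    rw [pvMinHit, if_neg (ne_true_of_eq_false h0)]
    rw [pvMinHit, if_neg (ne_true_of_eq_false h1)]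
    rw [pvMinHit, if_neg (ne_true_of_eq_false h2)]
    rw [pvMinHit, if_neg (ne_true_of_eq_false h3)]
    rw [pvMinHit, if_neg (ne_true_of_eq_false h4)]
    rw [pvMinHit, if_neg (ne_true_of_eq_false h5)]
    rw [pvMinHit, if_pos h6]
    rw [pvMinHit_const _ s 2 (by decide)]
    rfl
  rw [Bool.not_eq_true] at h6
  by_cases h7 : PySem.Str.isIn "rsi" s = true
  · simp only [h0, h1, h2, h3, h4, h5, h6, h7, List.any_cons, List.any_nil, Bool.false_or, Bool.or_false, Bool.or_true, Bool.true_or, if_true, if_false, ite_true, ite_false]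
    rw [pvMinHit, if_neg (ne_true_of_eq_false h0)]
    rw [pvMinHit, if_neg (ne_true_of_eq_false h1)]
    rw [pvMinHit, if_neg (ne_true_of_eq_false h2)]
    rw [pvMinHit, if_neg (ne_true_of_eq_false h3)]
    rw [pvMinHit, if_neg (ne_true_of_eq_false h4)]
    rw [pvMinHit, if_neg (ne_true_of_eq_false h5)]
    rw [pvMinHit, if_neg (ne_true_of_eq_false h6)]
    rw [pvMinHit, if_pos h7]
    rw [pvMinHit_const _ s 3 (by decide)]
    rfl
  rw [Bool.not_eq_true] at h7
  by_cases h8 : PySem.Str.isIn "macd" s = true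
  · simp only [h0, h1, h2, h3, h4, h5, h6, h7, h8, List.any_cons, List.any_nil, Bool.false_or, Bool.or_false, Bool.or_true, Bool.true_or, if_true, if_false, ite_true, ite_false]
    rw [pvMinHit, if_neg (ne_true_of_eq_false h0)]
    rw [pvMinHit, if_neg (ne_true_of_eq_false h1)]
    rw [pvMinHit, if_neg (ne_true_of_eq_false h2)]
    rw [pvMinHit, if_neg (ne_true_of_eq_false h3)]
    rw [pvMinHit, if_neg (ne_true_of_eq_false h4)]
    rw [pvMinHit, if_neg (ne_true_of_eq_false h5)]
    rw [pvMinHit, if_neg (ne_true_of_eq_false h6)]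
    rw [pvMinHit, if_neg (ne_true_of_eq_false h7)]
    rw [pvMinHit, if_pos h8]
    rw [pvMinHit_const _ s 3 (by decide)]
    rfl
  rw [Bool.not_eq_true] at h8
  by_cases h9 : PySem.Str.isIn "bb_" s = true
  · simp only [h0, h1, h2, h3, h4, h5, h6, h7, h8, h9, List.any_cons, List.any_nil, Bool.false_or, Bool.or_false, Bool.or_true, Bool.true_or, if_true, if_false, ite_true, ite_false]
    rw [pvMinHit, if_neg (ne_true_of_eq_false h0)]
    rw [pvMinHit, if_neg (ne_true_of_eq_false h1)]
    rw [pvMinHit, if_neg (ne_true_of_eq_false h2)]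
    rw [pvMinHit, if_neg (ne_true_of_eq_false h3)]
    rw [pvMinHit, if_neg (ne_true_of_eq_false h4)]
    rw [pvMinHit, if_neg (ne_true_of_eq_false h5)]
    rw [pvMinHit, if_neg (ne_true_of_eq_false h6)]
    rw [pvMinHit, if_neg (ne_true_of_eq_false h7)]
    rw [pvMinHit, if_neg (ne_true_of_eq_false h8)]
    rw [pvMinHit, if_pos h9]
    rw [pvMinHit_const _ s 3 (by decide)]
    rfl
  rw [Bool.not_eq_true] at h9
  by_cases h10 : PySem.Str.isIn "stoch" s = true
  · simp only [h0, h1, h2, h3, h4, h5, h6, h7, h8, h9, h10, List.any_cons, List.any_nil, Bool.false_or, Bool.or_false, Bool.or_true, Bool.true_or, if_true, if_false, ite_true, ite_false]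
    rw [pvMinHit, if_neg (ne_true_of_eq_false h0)]
    rw [pvMinHit, if_neg (ne_true_of_eq_false h1)]
    rw [pvMinHit, if_neg (ne_true_of_eq_false h2)]
    rw [pvMinHit, if_neg (ne_true_of_eq_false h3)]
    rw [pvMinHit, if_neg (ne_true_of_eq_false h4)]
    rw [pvMinHit, if_neg (ne_true_of_eq_false h5)]
    rw [pvMinHit, if_neg (ne_true_of_eq_false h6)]
    rw [pvMinHit, if_neg (ne_true_of_eq_false h7)]
    rw [pvMinHit, if_neg (ne_true_of_eq_false h8)]
    rw [pvMinHit, if_neg (ne_true_of_eq_false h9)]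
    rw [pvMinHit, if_pos h10]
    rw [pvMinHit_const _ s 3 (by decide)]
    rfl
  rw [Bool.not_eq_true] at h10
  by_cases h11 : PySem.Str.isIn "williams" s = true
  · simp only [h0, h1, h2, h3, h4, h5, h6, h7, h8, h9, h10, h11, List.any_cons, List.any_nil, Bool.false_or, Bool.or_false, Bool.or_true, Bool.true_or, if_true, if_false, ite_true, ite_false]
    rw [pvMinHit, if_neg (ne_true_of_eq_false h0)]
    rw [pvMinHit, if_neg (ne_true_of_eq_false h1)]
    rw [pvMinHit, if_neg (ne_true_of_eq_false h2)]
    rw [pvMinHit, if_neg (ne_true_of_eq_false h3)]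
    rw [pvMinHit, if_neg (ne_true_of_eq_false h4)]
    rw [pvMinHit, if_neg (ne_true_of_eq_false h5)]
    rw [pvMinHit, if_neg (ne_true_of_eq_false h6)]
    rw [pvMinHit, if_neg (ne_true_of_eq_false h7)]
    rw [pvMinHit, if_neg (ne_true_of_eq_false h8)]
    rw [pvMinHit, if_neg (ne_true_of_eq_false h9)]
    rw [pvMinHit, if_neg (ne_true_of_eq_false h10)]
    rw [pvMinHit, if_pos h11]
    rw [pvMinHit_const _ s 3 (by decide)]
    rfl
  rw [Bool.not_eq_true] at h11
  by_cases h12 : PySem.Str.isIn "whale" s = true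
  · simp only [h0, h1, h2, h3, h4, h5, h6, h7, h8, h9, h10, h11, h12, List.any_cons, List.any_nil, Bool.false_or, Bool.or_false, Bool.or_true, Bool.true_or, if_true, if_false, ite_true, ite_false]
    rw [pvMinHit, if_neg (ne_true_of_eq_false h0)]
    rw [pvMinHit, if_neg (ne_true_of_eq_false h1)]
    rw [pvMinHit, if_neg (ne_true_of_eq_false h2)]
    rw [pvMinHit, if_neg (ne_true_of_eq_false h3)]
    rw [pvMinHit, if_neg (ne_true_of_eq_false h4)]
    rw [pvMinHit, if_neg (ne_true_of_eq_false h5)]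
    rw [pvMinHit, if_neg (ne_true_of_eq_false h6)]
    rw [pvMinHit, if_neg (ne_true_of_eq_false h7)]
    rw [pvMinHit, if_neg (ne_true_of_eq_false h8)]
    rw [pvMinHit, if_neg (ne_true_of_eq_false h9)]
    rw [pvMinHit, if_neg (ne_true_of_eq_false h10)]
    rw [pvMinHit, if_neg (ne_true_of_eq_false h11)]
    rw [pvMinHit, if_pos h12]
    rw [pvMinHit_const _ s 4 (by decide)]
    rfl
  rw [Bool.not_eq_true] at h12
  by_cases h13 : PySem.Str.isIn "flow" s = true
  · simp only [h0, h1, h2, h3, h4, h5, h6, h7, h8, h9, h10, h11, h12, h13, List.any_cons, List.any_nil, Bool.false_or, Bool.or_false, Bool.or_true, Bool.true_or, if_true, if_false, ite_true, ite_false]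
    rw [pvMinHit, if_neg (ne_true_of_eq_false h0)]
    rw [pvMinHit, if_neg (ne_true_of_eq_false h1)]
    rw [pvMinHit, if_neg (ne_true_of_eq_false h2)]
    rw [pvMinHit, if_neg (ne_true_of_eq_false h3)]
    rw [pvMinHit, if_neg (ne_true_of_eq_false h4)]
    rw [pvMinHit, if_neg (ne_true_of_eq_false h5)]
    rw [pvMinHit, if_neg (ne_true_of_eq_false h6)]
    rw [pvMinHit, if_neg (ne_true_of_eq_false h7)]
    rw [pvMinHit, if_neg (ne_true_of_eq_false h8)]
    rw [pvMinHit, if_neg (ne_true_of_eq_false h9)]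
    rw [pvMinHit, if_neg (ne_true_of_eq_false h10)]
    rw [pvMinHit, if_neg (ne_true_of_eq_false h11)]
    rw [pvMinHit, if_neg (ne_true_of_eq_false h12)]
    rw [pvMinHit, if_pos h13]
    rw [pvMinHit_const _ s 4 (by decide)]
    rfl
  rw [Bool.not_eq_true] at h13
  by_cases h14 : PySem.Str.isIn "intensity" s = true
  · simp only [h0, h1, h2, h3, h4, h5, h6, h7, h8, h9, h10, h11, h12, h13, h14, List.any_cons, List.any_nil, Bool.false_or, Bool.or_false, Bool.or_true, Bool.true_or, if_true, if_false, ite_true, ite_false]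
    rw [pvMinHit, if_neg (ne_true_of_eq_false h0)]
    rw [pvMinHit, if_neg (ne_true_of_eq_false h1)]
    rw [pvMinHit, if_neg (ne_true_of_eq_false h2)]
    rw [pvMinHit, if_neg (ne_true_of_eq_false h3)]
    rw [pvMinHit, if_neg (ne_true_of_eq_false h4)]
    rw [pvMinHit, if_neg (ne_true_of_eq_false h5)]
    rw [pvMinHit, if_neg (ne_true_of_eq_false h6)]
    rw [pvMinHit, if_neg (ne_true_of_eq_false h7)]
    rw [pvMinHit, if_neg (ne_true_of_eq_false h8)]
    rw [pvMinHit, if_neg (ne_true_of_eq_false h9)]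
    rw [pvMinHit, if_neg (ne_true_of_eq_false h10)]
    rw [pvMinHit, if_neg (ne_true_of_eq_false h11)]
    rw [pvMinHit, if_neg (ne_true_of_eq_false h12)]
    rw [pvMinHit, if_neg (ne_true_of_eq_false h13)]
    rw [pvMinHit, if_pos h14]
    rw [pvMinHit_const _ s 4 (by decide)]
    rfl
  rw [Bool.not_eq_true] at h14
  by_cases h15 : PySem.Str.isIn "vol" s = true
  · simp only [h0, h1, h2, h3, h4, h5, h6, h7, h8, h9, h10, h11, h12, h13, h14, h15, List.any_cons, List.any_nil, Bool.false_or, Bool.or_false, Bool.or_true, Bool.true_or, if_true, if_false, ite_true, ite_false]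
    rw [pvMinHit, if_neg (ne_true_of_eq_false h0)]
    rw [pvMinHit, if_neg (ne_true_of_eq_false h1)]
    rw [pvMinHit, if_neg (ne_true_of_eq_false h2)]
    rw [pvMinHit, if_neg (ne_true_of_eq_false h3)]
    rw [pvMinHit, if_neg (ne_true_of_eq_false h4)]
    rw [pvMinHit, if_neg (ne_true_of_eq_false h5)]
    rw [pvMinHit, if_neg (ne_true_of_eq_false h6)]
    rw [pvMinHit, if_neg (ne_true_of_eq_false h7)]
    rw [pvMinHit, if_neg (ne_true_of_eq_false h8)]
    rw [pvMinHit, if_neg (ne_true_of_eq_false h9)]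
    rw [pvMinHit, if_neg (ne_true_of_eq_false h10)]
    rw [pvMinHit, if_neg (ne_true_of_eq_false h11)]
    rw [pvMinHit, if_neg (ne_true_of_eq_false h12)]
    rw [pvMinHit, if_neg (ne_true_of_eq_false h13)]
    rw [pvMinHit, if_neg (ne_true_of_eq_false h14)]
    rw [pvMinHit, if_pos h15]
    rw [pvMinHit_const _ s 5 (by decide)]
    rfl
  rw [Bool.not_eq_true] at h15
  by_cases h16 : PySem.Str.isIn "change" s = true
  · simp only [h0, h1, h2, h3, h4, h5, h6, h7, h8, h9, h10, h11, h12, h13, h14, h15, h16, List.any_cons, List.any_nil, Bool.false_or, Bool.or_false, Bool.or_true, Bool.true_or, if_true, if_false, ite_true, ite_false]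
    rw [pvMinHit, if_neg (ne_true_of_eq_false h0)]
    rw [pvMinHit, if_neg (ne_true_of_eq_false h1)]
    rw [pvMinHit, if_neg (ne_true_of_eq_false h2)]
    rw [pvMinHit, if_neg (ne_true_of_eq_false h3)]
    rw [pvMinHit, if_neg (ne_true_of_eq_false h4)]
    rw [pvMinHit, if_neg (ne_true_of_eq_false h5)]
    rw [pvMinHit, if_neg (ne_true_of_eq_false h6)]
    rw [pvMinHit, if_neg (ne_true_of_eq_false h7)]
    rw [pvMinHit, if_neg (ne_true_of_eq_false h8)]
    rw [pvMinHit, if_neg (ne_true_of_eq_false h9)]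
    rw [pvMinHit, if_neg (ne_true_of_eq_false h10)]
    rw [pvMinHit, if_neg (ne_true_of_eq_false h11)]
    rw [pvMinHit, if_neg (ne_true_of_eq_false h12)]
    rw [pvMinHit, if_neg (ne_true_of_eq_false h13)]
    rw [pvMinHit, if_neg (ne_true_of_eq_false h14)]
    rw [pvMinHit, if_neg (ne_true_of_eq_false h15)]
    rw [pvMinHit, if_pos h16]
    rw [pvMinHit_const _ s 5 (by decide)]
    rfl
  rw [Bool.not_eq_true] at h16
  by_cases h17 : PySem.Str.isIn "interaction" s = true
  · simp only [h0, h1, h2, h3, h4, h5, h6, h7, h8, h9, h10, h11, h12, h13, h14, h15, h16, h17, List.any_cons, List.any_nil, Bool.false_or, Bool.or_false, Bool.or_true, Bool.true_or, if_true, if_false, ite_true, ite_false]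
    rw [pvMinHit, if_neg (ne_true_of_eq_false h0)]
    rw [pvMinHit, if_neg (ne_true_of_eq_false h1)]
    rw [pvMinHit, if_neg (ne_true_of_eq_false h2)]
    rw [pvMinHit, if_neg (ne_true_of_eq_false h3)]
    rw [pvMinHit, if_neg (ne_true_of_eq_false h4)]
    rw [pvMinHit, if_neg (ne_true_of_eq_false h5)]
    rw [pvMinHit, if_neg (ne_true_of_eq_false h6)]
    rw [pvMinHit, if_neg (ne_true_of_eq_false h7)]
    rw [pvMinHit, if_neg (ne_true_of_eq_false h8)]
    rw [pvMinHit, if_neg (ne_true_of_eq_false h9)]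
    rw [pvMinHit, if_neg (ne_true_of_eq_false h10)]
    rw [pvMinHit, if_neg (ne_true_of_eq_false h11)]
    rw [pvMinHit, if_neg (ne_true_of_eq_false h12)]
    rw [pvMinHit, if_neg (ne_true_of_eq_false h13)]
    rw [pvMinHit, if_neg (ne_true_of_eq_false h14)]
    rw [pvMinHit, if_neg (ne_true_of_eq_false h15)]
    rw [pvMinHit, if_neg (ne_true_of_eq_false h16)]
    rw [pvMinHit, if_pos h17]
    rw [pvMinHit_const _ s 6 (by decide)]
    rfl
  rw [Bool.not_eq_true] at h17
  by_cases h18 : PySem.Str.isIn "log" s = true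
  · simp only [h0, h1, h2, h3, h4, h5, h6, h7, h8, h9, h10, h11, h12, h13, h14, h15, h16, h17, h18, List.any_cons, List.any_nil, Bool.false_or, Bool.or_false, Bool.or_true, Bool.true_or, if_true, if_false, ite_true, ite_false]
    rw [pvMinHit, if_neg (ne_true_of_eq_false h0)]
    rw [pvMinHit, if_neg (ne_true_of_eq_false h1)]
    rw [pvMinHit, if_neg (ne_true_of_eq_false h2)]
    rw [pvMinHit, if_neg (ne_true_of_eq_false h3)]
    rw [pvMinHit, if_neg (ne_true_of_eq_false h4)]
    rw [pvMinHit, if_neg (ne_true_of_eq_false h5)]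
    rw [pvMinHit, if_neg (ne_true_of_eq_false h6)]
    rw [pvMinHit, if_neg (ne_true_of_eq_false h7)]
    rw [pvMinHit, if_neg (ne_true_of_eq_false h8)]
    rw [pvMinHit, if_neg (ne_true_of_eq_false h9)]
    rw [pvMinHit, if_neg (ne_true_of_eq_false h10)]
    rw [pvMinHit, if_neg (ne_true_of_eq_false h11)]
    rw [pvMinHit, if_neg (ne_true_of_eq_false h12)]
    rw [pvMinHit, if_neg (ne_true_of_eq_false h13)]
    rw [pvMinHit, if_neg (ne_true_of_eq_false h14)]
    rw [pvMinHit, if_neg (ne_true_of_eq_false h15)]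
    rw [pvMinHit, if_neg (ne_true_of_eq_false h16)]
    rw [pvMinHit, if_neg (ne_true_of_eq_false h17)]
    rw [pvMinHit, if_pos h18]
    rw [pvMinHit_const _ s 7 (by decide)]
    rfl
  rw [Bool.not_eq_true] at h18
  by_cases h19 : PySem.Str.isIn "sqrt" s = true
  · simp only [h0, h1, h2, h3, h4, h5, h6, h7, h8, h9, h10, h11, h12, h13, h14, h15, h16, h17, h18, h19, List.any_cons, List.any_nil, Bool.false_or, Bool.or_false, Bool.or_true, Bool.true_or, if_true, if_false, ite_true, ite_false]
    rw [pvMinHit, if_neg (ne_true_of_eq_false h0)]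
    rw [pvMinHit, if_neg (ne_true_of_eq_false h1)]
    rw [pvMinHit, if_neg (ne_true_of_eq_false h2)]
    rw [pvMinHit, if_neg (ne_true_of_eq_false h3)]
    rw [pvMinHit, if_neg (ne_true_of_eq_false h4)]
    rw [pvMinHit, if_neg (ne_true_of_eq_false h5)]
    rw [pvMinHit, if_neg (ne_true_of_eq_false h6)]
    rw [pvMinHit, if_neg (ne_true_of_eq_false h7)]
    rw [pvMinHit, if_neg (ne_true_of_eq_false h8)]
    rw [pvMinHit, if_neg (ne_true_of_eq_false h9)]
    rw [pvMinHit, if_neg (ne_true_of_eq_false h10)]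
    rw [pvMinHit, if_neg (ne_true_of_eq_false h11)]
    rw [pvMinHit, if_neg (ne_true_of_eq_false h12)]
    rw [pvMinHit, if_neg (ne_true_of_eq_false h13)]
    rw [pvMinHit, if_neg (ne_true_of_eq_false h14)]
    rw [pvMinHit, if_neg (ne_true_of_eq_false h15)]
    rw [pvMinHit, if_neg (ne_true_of_eq_false h16)]
    rw [pvMinHit, if_neg (ne_true_of_eq_false h17)]
    rw [pvMinHit, if_neg (ne_true_of_eq_false h18)]
    rw [pvMinHit, if_pos h19]
    rw [pvMinHit_const _ s 7 (by decide)]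
    rfl
  rw [Bool.not_eq_true] at h19
  by_cases h20 : PySem.Str.isIn "zscore" s = true
  · simp only [h0, h1, h2, h3, h4, h5, h6, h7, h8, h9, h10, h11, h12, h13, h14, h15, h16, h17, h18, h19, h20, List.any_cons, List.any_nil, Bool.false_or, Bool.or_false, Bool.or_true, Bool.true_or, if_true, if_false, ite_true, ite_false]
    rw [pvMinHit, if_neg (ne_true_of_eq_false h0)]
    rw [pvMinHit, if_neg (ne_true_of_eq_false h1)]
    rw [pvMinHit, if_neg (ne_true_of_eq_false h2)]
    rw [pvMinHit, if_neg (ne_true_of_eq_false h3)]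
    rw [pvMinHit, if_neg (ne_true_of_eq_false h4)]
    rw [pvMinHit, if_neg (ne_true_of_eq_false h5)]
    rw [pvMinHit, if_neg (ne_true_of_eq_false h6)]
    rw [pvMinHit, if_neg (ne_true_of_eq_false h7)]
    rw [pvMinHit, if_neg (ne_true_of_eq_false h8)]
    rw [pvMinHit, if_neg (ne_true_of_eq_false h9)]
    rw [pvMinHit, if_neg (ne_true_of_eq_false h10)]
    rw [pvMinHit, if_neg (ne_true_of_eq_false h11)]
    rw [pvMinHit, if_neg (ne_true_of_eq_false h12)]
    rw [pvMinHit, if_neg (ne_true_of_eq_false h13)]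
    rw [pvMinHit, if_neg (ne_true_of_eq_false h14)]
    rw [pvMinHit, if_neg (ne_true_of_eq_false h15)]
    rw [pvMinHit, if_neg (ne_true_of_eq_false h16)]
    rw [pvMinHit, if_neg (ne_true_of_eq_false h17)]
    rw [pvMinHit, if_neg (ne_true_of_eq_false h18)]
    rw [pvMinHit, if_neg (ne_true_of_eq_false h19)]
    rw [pvMinHit, if_pos h20]
    rw [pvMinHit_const _ s 7 (by decide)]
    rfl
  rw [Bool.not_eq_true] at h20
  simp only [h0, h1, h2, h3, h4, h5, h6, h7, h8, h9, h10, h11, h12, h13, h14, h15, h16, h17, h18, h19, h20, List.any_cons, List.any_nil, Bool.false_or, Bool.or_false, Bool.or_true, Bool.true_or, if_true, if_false, ite_true, ite_false]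
  rw [pvMinHit, if_neg (ne_true_of_eq_false h0)]
  rw [pvMinHit, if_neg (ne_true_of_eq_false h1)]
  rw [pvMinHit, if_neg (ne_true_of_eq_false h2)]
  rw [pvMinHit, if_neg (ne_true_of_eq_false h3)]
  rw [pvMinHit, if_neg (ne_true_of_eq_false h4)]
  rw [pvMinHit, if_neg (ne_true_of_eq_false h5)]
  rw [pvMinHit, if_neg (ne_true_of_eq_false h6)]
  rw [pvMinHit, if_neg (ne_true_of_eq_false h7)]
  rw [pvMinHit, if_neg (ne_true_of_eq_false h8)]
  rw [pvMinHit, if_neg (ne_true_of_eq_false h9)]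
  rw [pvMinHit, if_neg (ne_true_of_eq_false h10)]
  rw [pvMinHit, if_neg (ne_true_of_eq_false h11)]
  rw [pvMinHit, if_neg (ne_true_of_eq_false h12)]
  rw [pvMinHit, if_neg (ne_true_of_eq_false h13)]
  rw [pvMinHit, if_neg (ne_true_of_eq_false h14)]
  rw [pvMinHit, if_neg (ne_true_of_eq_false h15)]
  rw [pvMinHit, if_neg (ne_true_of_eq_false h16)]
  rw [pvMinHit, if_neg (ne_true_of_eq_false h17)]
  rw [pvMinHit, if_neg (ne_true_of_eq_false h18)]
  rw [pvMinHit, if_neg (ne_true_of_eq_false h19)]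
  rw [pvMinHit, if_neg (ne_true_of_eq_false h20)]
  rfl
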